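-- pv_equiv track=rewrite | github.com/Yawn-Sean/Daily_CF_Problems | daily_problems/2024/05/0515/personal_submission/cf490e_hum.py | f
-- ===== SOURCE A (Python) =====
-- def f(s, last):
--   if '?' not in s:
--     if int(s) > last:
--       return int(s)
--     else:
--       return -1
--
--   if len(s) < len(str(last)):
--     return -1
--   elif len(s) > len(str(last)):
--     if s[0] == '?':
--       s = '1' + s[1:]
--     s = s.replace('?', '0')
--     return int(s)
--
--   else:
--     n = len(s)
--     s = list(s)
--     t = list(str(last))
--     find = False
--     stk = []
--     for i in range(n):
--       if s[i] == '?':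
--         stk.append(i)
--       else:
--         if s[i] > t[i]:
--           find = True
--           break
--         elif s[i] < t[i]:
--           find = False
--           break
--
--     if find:
--       for i in stk:
--         s[i] = t[i]
--       s = ''.join(s).replace('?', '0')
--       return int(s)
--     else:
--       if stk:
--         while stk:
--           i = stk.pop()
--           if t[i] == '9':
--             continue
--           else:
--             s[i] = str(int(t[i]) + 1)
--             for i in stk:
--               s[i] = t[i]
--             s = ''.join(s).replace('?', '0')
--             return int(s)
--
--     return -1
-- ===== SOURCE B (Python) =====
-- def f(s, last):
--     t = str(last)
--     if '?' not in s:
--         v = int(s)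
--         return v if v > last else -1
--     if len(s) < len(t):
--         return -1
--     if len(s) > len(t):
--         head = '1' if s[0] == '?' else s[0]
--         return int(head + s[1:].replace('?', '0'))
--     res = _tight(s, t, 0)
--     return int(res) if res is not None else -1
--
-- def _tight(s, t, i):
--     # Minimal way to complete s[i:] so it is strictly greater than t[i:],
--     # assuming the digits before position i are kept equal to t; None if impossible.
--     if i == len(s):
--         return None
--     c, d = s[i], t[i]
--     if c == '?':
--         r = _tight(s, t, i + 1)
--         if r is not None:
--             return d + r
--         if d != '9':
--             return str(int(d) + 1) + s[i + 1:].replace('?', '0')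
--         return None
--     if c > d:
--         return c + s[i + 1:].replace('?', '0')
--     if c < d:
--         return None
--     r = _tight(s, t, i + 1)
--     return c + r if r is not None else None
-- ===== Notes on version B (the rewrite author's own statement) =====
-- stated objective: simpler
-- what changed: The equal-length case's scan-collect-stack plus pop-and-patch construction is replaced by a single recursive tight-prefix pass (_tight) that directly builds the minimal completion strictly greater than str(last); the no-'?' guard and the two length branches stay.
-- outside the precondition, e.g. on f('?5', -3): A returns -5, B returns -5; on f(' ?7', 5): A returns 7, B returns 7
import Mathlib
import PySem

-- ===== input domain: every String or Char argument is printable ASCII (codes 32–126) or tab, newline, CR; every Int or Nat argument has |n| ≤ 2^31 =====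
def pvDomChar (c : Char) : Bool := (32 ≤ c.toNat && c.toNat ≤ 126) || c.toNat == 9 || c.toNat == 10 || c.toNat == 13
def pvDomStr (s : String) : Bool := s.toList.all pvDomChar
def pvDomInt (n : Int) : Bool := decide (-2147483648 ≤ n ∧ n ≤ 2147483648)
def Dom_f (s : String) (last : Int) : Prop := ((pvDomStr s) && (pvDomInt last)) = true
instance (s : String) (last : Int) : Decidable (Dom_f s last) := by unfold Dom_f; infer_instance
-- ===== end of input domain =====

-- B replaces A's scan-stack-then-pop construction in the equal-length case by one
-- recursive tight-prefix pass (objective: simpler / alternative; same return value).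

-- ===== PORT A =====
-- shared one-char/one-string primitives (both Pythons contain these very expressions)
-- s.replace('?', '0') applied charwise
def fill0 (c : Char) : Char := if c = '?' then '0' else c
-- str(int(d) + 1) for a one-char string d; '0' stands for the ValueError case (excluded by Pre_)
def digitSucc (d : Char) : Char :=
  match PySem.Int.ofStr? (String.mk [d]) with
  | some v => ((PySem.Int.toStr (v + 1)).toList.headD '0')
  | none => '0'
-- int(''.join(cs)); 0 stands for the ValueError case (excluded by Pre_)
def intD (cs : List Char) : Int := (PySem.Int.ofStr? (String.mk cs)).getD 0

-- A's first loop: for i in range(n): collect '?' indices, break on first fixed mismatch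
def fScan : List Char → List Char → Nat → List Nat → Bool × List Nat
  | [], _, _, stk => (false, stk)
  | _ :: _, [], _, stk => (false, stk)   -- t exhausted: unreachable at equal lengths
  | c :: cs, d :: ds, i, stk =>
    if c = '?' then fScan cs ds (i + 1) (stk ++ [i])
    else if d < c then (true, stk)
    else if c < d then (false, stk)
    else fScan cs ds (i + 1) stk

-- A's "for i in stk: s[i] = t[i]"
def fSetAll (tl : List Char) (sl : List Char) (stk : List Nat) : List Char :=
  stk.foldl (fun l i => l.set i (tl.getD i ' ')) sl

-- A's "while stk: i = stk.pop(); …" — argument is the stack reversed (pop = head)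
def fPop (sl tl : List Char) : List Nat → Option (List Char)
  | [] => none
  | i :: rest =>
    if tl.getD i ' ' = '9' then fPop sl tl rest
    else some ((fSetAll tl (sl.set i (digitSucc (tl.getD i ' '))) rest.reverse).map fill0)

def f (s : String) (last : Int) : Int :=
  let sl := s.toList
  if '?' ∉ sl then
    match PySem.Int.ofStr? s with
    | some v => if last < v then v else -1
    | none => 0           -- int(s) raises ValueError here (outside Pre_)
  else
    let tl := (PySem.Int.toStr last).toList
    if sl.length < tl.length then -1
    else if tl.length < sl.length then
      let sl1 := if sl.headD ' ' = '?' then '1' :: sl.drop 1 else sl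
      intD (sl1.map fill0)
    else
      match fScan sl tl 0 [] with
      | (true, stk) => intD ((fSetAll tl sl stk).map fill0)
      | (false, stk) =>
        match fPop sl tl stk.reverse with
        | some l => intD l
        | none => -1

-- ===== PORT B =====
-- B's _tight(s, t, i): minimal completion of the suffix strictly greater than t's suffix
def tight : List Char → List Char → Option (List Char)
  | [], _ => none
  | _ :: _, [] => none   -- t[i] would raise IndexError: unreachable at equal lengths
  | c :: cs, d :: ds =>
    if c = '?' then
      match tight cs ds with
      | some r => some (d :: r)
      | none => if d ≠ '9' then some (digitSucc d :: cs.map fill0) else none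
    else if d < c then some (c :: cs.map fill0)
    else if c < d then none
    else
      match tight cs ds with
      | some r => some (c :: r)
      | none => none

def f_alt (s : String) (last : Int) : Int :=
  let tl := (PySem.Int.toStr last).toList
  let sl := s.toList
  if '?' ∉ sl then
    match PySem.Int.ofStr? s with
    | some v => if last < v then v else -1
    | none => 0           -- int(s) raises ValueError here (outside Pre_)
  else if sl.length < tl.length then -1
  else if tl.length < sl.length then
    let head := if sl.headD ' ' = '?' then '1' else sl.headD ' '
    intD (head :: (sl.drop 1).map fill0)
  else
    match tight sl tl with
    | some r => intD r
    | none => -1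

-- ===== PRECONDITION & SPEC =====
-- Pre_ keeps the natural domain (digit/'?' patterns with last ≥ 0), plus every '?'-free
-- int()-parseable pattern and every '?'-pattern shorter than str(last) (A returns -1 there
-- for any characters).  It excludes the inputs where A raises ValueError (unparseable
-- '?'-free or filled patterns, non-digit chars hit by int()) and the '?'-patterns with
-- last < 0 or stray characters on which A's character comparisons against str(last)'s
-- '-' sign happen to produce an accidental value.
def Pre_f (s : String) (last : Int) : Prop :=
  ('?' ∉ s.toList ∧ (PySem.Int.ofStr? s).isSome = true)
  ∨ ('?' ∈ s.toList ∧ s.toList.length < (PySem.Int.toStr last).toList.length)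
  ∨ (s.toList ≠ [] ∧ (s.toList.all (fun c => PySem.Chars.isdigit c || c == '?')) = true ∧ 0 ≤ last)
instance (s : String) (last : Int) : Decidable (Pre_f s last) := by unfold Pre_f; infer_instance

def pvWitness_f : String × Int := ("1?3", 120)

def Spec_f (s : String) (last : Int) (out : Int) : Prop := out = f_alt s last
instance (s : String) (last : Int) (out : Int) : Decidable (Spec_f s last out) := by unfold Spec_f; infer_instance

-- ===== CLAIM (what is proved, stated in full; the proofs are below) =====
def Claim_equal_f : Prop := ∀ (s : String) (last : Int), Dom_f s last → Pre_f s last → Spec_f s last (f s last)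

-- ===== LEMMAS AND PROOFS =====

lemma digitChar_ne_q (k : Nat) : Nat.digitChar k ≠ '?' := by
  by_cases h : k < 16
  · interval_cases k <;> decide
  · have h0 : ¬ k = 0 := by omega
    have h1 : ¬ k = 1 := by omega
    have h2 : ¬ k = 2 := by omega
    have h3 : ¬ k = 3 := by omega
    have h4 : ¬ k = 4 := by omega
    have h5 : ¬ k = 5 := by omega
    have h6 : ¬ k = 6 := by omega
    have h7 : ¬ k = 7 := by omega
    have h8 : ¬ k = 8 := by omega
    have h9 : ¬ k = 9 := by omega
    have h10 : ¬ k = 10 := by omega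
    have h11 : ¬ k = 11 := by omega
    have h12 : ¬ k = 12 := by omega
    have h13 : ¬ k = 13 := by omega
    have h14 : ¬ k = 14 := by omega
    have h15 : ¬ k = 15 := by omega
    simp only [Nat.digitChar, h0, h1, h2, h3, h4, h5, h6, h7, h8, h9, h10, h11, h12, h13, h14,
      h15, if_false]
    decide

lemma mem_toDigitsCore (fuel n : Nat) (ds : List Char) (c : Char)
    (h : c ∈ Nat.toDigitsCore 10 fuel n ds) : (∃ k, c = Nat.digitChar k) ∨ c ∈ ds := by
  induction fuel generalizing n ds with
  | zero => simp [Nat.toDigitsCore] at h; exact Or.inr h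
  | succ fuel ih =>
    rw [Nat.toDigitsCore] at h
    by_cases h10 : n / 10 = 0
    · simp [h10] at h
      rcases h with h | h
      · exact Or.inl ⟨n % 10, h⟩
      · exact Or.inr h
    · simp [h10] at h
      rcases ih _ _ h with h' | h'
      · exact Or.inl h'
      · rcases List.mem_cons.mp h' with h'' | h''
        · exact Or.inl ⟨n % 10, h''⟩
        · exact Or.inr h''

lemma mem_toChars_ne_q (n : Int) (c : Char) (h : c ∈ PySem.Int.toChars n) : c ≠ '?' := by
  unfold PySem.Int.toChars at h
  split at h
  · rcases List.mem_cons.mp h with h' | h'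
    · subst h'; decide
    · rcases mem_toDigitsCore _ _ _ _ h' with ⟨k, hk⟩ | h''
      · subst hk; exact digitChar_ne_q k
      · simp at h''
  · rcases mem_toDigitsCore _ _ _ _ h with ⟨k, hk⟩ | h''
    · subst hk; exact digitChar_ne_q k
    · simp at h''

lemma toChars_ne_q (n : Int) : '?' ∉ PySem.Int.toChars n :=
  fun h => mem_toChars_ne_q n '?' h rfl

lemma digitSucc_ne_q (d : Char) : digitSucc d ≠ '?' := by
  unfold digitSucc
  cases hv : PySem.Int.ofStr? (String.mk [d]) with
  | none => decide
  | some v =>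
    simp only []
    rw [PySem.Int.toList_toStr]
    cases hc : PySem.Int.toChars (v + 1) with
    | nil => decide
    | cons a l =>
      simp only [List.headD_cons]
      exact mem_toChars_ne_q (v + 1) a (by rw [hc]; exact List.mem_cons_self ..)

lemma fill0_digitSucc (d : Char) : fill0 (digitSucc d) = digitSucc d := by
  simp [fill0, digitSucc_ne_q d]

lemma fill0_ne_q (c : Char) (h : c ≠ '?') : fill0 c = c := by simp [fill0, h]

-- scanning from offset i with accumulator stk only shifts the collected indices
lemma fScan_shift : ∀ (cs ds : List Char) (i : Nat) (stk : List Nat),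
    fScan cs ds i stk = ((fScan cs ds 0 []).1, stk ++ (fScan cs ds 0 []).2.map (· + i)) := by
  intro cs
  induction cs with
  | nil => intro ds i stk; simp [fScan]
  | cons c cs ih =>
    intro ds i stk
    cases ds with
    | nil => simp [fScan]
    | cons d ds =>
      by_cases hc : c = '?'
      · have L : fScan (c :: cs) (d :: ds) i stk = fScan cs ds (i + 1) (stk ++ [i]) := by
          simp [fScan, hc]
        have R : fScan (c :: cs) (d :: ds) 0 [] = fScan cs ds 1 [0] := by
          simp [fScan, hc]
        rw [L, R, ih ds (i + 1) (stk ++ [i]), ih ds 1 [0]]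
        simp only [List.map_map, List.append_assoc, List.cons_append, List.nil_append,
          List.map_cons, Prod.mk.injEq, List.append_cancel_left_eq, List.cons.injEq, true_and]
        constructor
        · omega
        · apply List.map_congr_left
          intro a _
          simp [Function.comp]
          omega
      · by_cases h1 : d < c
        · simp [fScan, hc, h1]
        · by_cases h2 : c < d
          · simp [fScan, hc, h1, h2]
          · have L : fScan (c :: cs) (d :: ds) i stk = fScan cs ds (i + 1) stk := by
              simp [fScan, hc, h1, h2]
            have R : fScan (c :: cs) (d :: ds) 0 [] = fScan cs ds 1 [] := by
              simp [fScan, hc, h1, h2]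
            rw [L, R, ih ds (i + 1) stk, ih ds 1 []]
            simp only [List.map_map, List.nil_append, Prod.mk.injEq,
              List.append_cancel_left_eq, true_and]
            apply List.map_congr_left
            intro a _
            simp [Function.comp]
            omega

-- setting only shifted indices leaves the head alone and acts on the tail
lemma fSetAll_shift (tl : List Char) (d c : Char) :
    ∀ (stk : List Nat) (cs : List Char),
      fSetAll (d :: tl) (c :: cs) (stk.map (· + 1)) = c :: fSetAll tl cs stk := by
  intro stk
  induction stk with
  | nil => intro cs; simp [fSetAll]
  | cons i r ih =>
    intro cs
    simp only [List.map_cons, fSetAll, List.foldl_cons] at *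
    rw [show ((c :: cs).set (i + 1) ((d :: tl).getD (i + 1) ' ')) = c :: cs.set i (tl.getD i ' ')
      by simp, ih]

lemma fPop_shift_fix (c d : Char) (hc : c ≠ '?') (cs ds : List Char) :
    ∀ (rstk : List Nat),
      fPop (c :: cs) (d :: ds) (rstk.map (· + 1)) = (fPop cs ds rstk).map (fun l => c :: l) := by
  intro rstk
  induction rstk with
  | nil => simp [fPop]
  | cons i r ih =>
    simp only [List.map_cons, fPop]
    by_cases h9 : ds.getD i ' ' = '9'
    · simp only [List.getD_cons_succ, h9, if_pos]
      exact ih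
    · simp only [List.getD_cons_succ, if_neg h9]
      have e1 : ((c :: cs).set (i + 1) (digitSucc (ds.getD i ' '))) =
          c :: cs.set i (digitSucc (ds.getD i ' ')) := by simp
      have e2 : (List.map (fun x : Nat => x + 1) r).reverse =
          r.reverse.map (fun x : Nat => x + 1) := by simp
      rw [e1, e2, fSetAll_shift]
      simp [fill0_ne_q c hc]

lemma fPop_shift_q (d : Char) (hd : d ≠ '?') (cs ds : List Char) :
    ∀ (rstk : List Nat),
      fPop ('?' :: cs) (d :: ds) (rstk.map (· + 1) ++ [0]) =
        (match fPop cs ds rstk with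
         | some l => some (d :: l)
         | none => if d = '9' then none else some (digitSucc d :: cs.map fill0)) := by
  intro rstk
  induction rstk with
  | nil =>
    simp only [List.map_nil, List.nil_append, fPop]
    by_cases h9 : d = '9'
    · simp [h9]
    · simp only [List.getD_cons_zero, if_neg h9]
      rw [show (('?' :: cs).set 0 (digitSucc d)) = digitSucc d :: cs by simp]
      simp [fSetAll, fill0_digitSucc d]
  | cons i r ih =>
    simp only [List.map_cons, List.cons_append, fPop]
    by_cases h9 : ds.getD i ' ' = '9'
    · simp only [List.getD_cons_succ, h9, if_pos]
      exact ih
    · simp only [List.getD_cons_succ, if_neg h9]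
      have e1 : (('?' :: cs).set (i + 1) (digitSucc (ds.getD i ' '))) =
          '?' :: cs.set i (digitSucc (ds.getD i ' ')) := by simp
      have e2 : (List.map (fun x : Nat => x + 1) r ++ [0]).reverse =
          0 :: r.reverse.map (fun x : Nat => x + 1) := by simp
      have e3 : ∀ X : List Char, fSetAll (d :: ds) ('?' :: X)
          (0 :: r.reverse.map (fun x : Nat => x + 1)) = d :: fSetAll ds X r.reverse := by
        intro X
        simp only [fSetAll, List.foldl_cons]
        have e4 : (('?' :: X).set 0 ((d :: ds).getD 0 ' ')) = d :: X := by simp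
        rw [e4]
        exact fSetAll_shift ds d d _ X
      rw [e1, e2, e3]
      simp [fill0_ne_q d hd]

-- the core lemma: A's equal-length branch computes exactly B's tight completion
lemma main_eq : ∀ (sl tl : List Char), sl.length = tl.length → '?' ∉ tl →
    (match fScan sl tl 0 [] with
     | (true, stk) => some ((fSetAll tl sl stk).map fill0)
     | (false, stk) => fPop sl tl stk.reverse) = tight sl tl := by
  intro sl
  induction sl with
  | nil =>
    intro tl hlen _
    cases tl with
    | nil => simp [fScan, fPop, tight]

    | cons d ds => simp at hlen
  | cons c cs ih =>
    intro tl hlen hq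
    cases tl with
    | nil => simp at hlen
    | cons d ds =>
      have hd : d ≠ '?' := fun h => hq (h ▸ List.mem_cons_self ..)
      have hq' : '?' ∉ ds := fun h => hq (List.mem_cons_of_mem _ h)
      have hlen' : cs.length = ds.length := by simpa using hlen
      have IH := ih ds hlen' hq'
      by_cases hc : c = '?'
      · subst hc
        rw [show fScan ('?' :: cs) (d :: ds) 0 [] = fScan cs ds 1 [0] by simp [fScan]]
        rw [fScan_shift cs ds 1 [0]]
        rcases hp : fScan cs ds 0 [] with ⟨find, stk⟩
        cases find
        · -- no strictly-greater fixed mismatch below: pop path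
          simp only []
          have e1 : ([0] ++ stk.map (fun x : Nat => x + 1)).reverse =
              stk.reverse.map (fun x : Nat => x + 1) ++ [0] := by simp
          rw [e1, fPop_shift_q d hd cs ds stk.reverse]
          rw [hp] at IH
          simp only [] at IH
          rw [tight, if_pos rfl, ← IH]
          cases fPop cs ds stk.reverse with
          | none => by_cases h9 : d = '9' <;> simp [h9]
          | some l => simp
        · -- strictly-greater fixed mismatch below: overlay path
          simp only []
          rw [show fSetAll (d :: ds) ('?' :: cs) ([0] ++ stk.map (· + 1)) =
                d :: fSetAll ds cs stk from ?_]
          · rw [tight, if_pos rfl, ← IH, hp]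
            simp [fill0_ne_q d hd]
          · simp only [fSetAll, List.cons_append, List.nil_append, List.foldl_cons]
            rw [show (('?' :: cs).set 0 ((d :: ds).getD 0 ' ')) = d :: cs by simp]
            exact fSetAll_shift ds d d stk cs
      · by_cases h1 : d < c
        · rw [show fScan (c :: cs) (d :: ds) 0 [] = (true, []) by simp [fScan, hc, h1]]
          rw [tight, if_neg hc, if_pos h1]
          simp [fSetAll, fill0_ne_q c hc]
        · by_cases h2 : c < d
          · rw [show fScan (c :: cs) (d :: ds) 0 [] = (false, []) by simp [fScan, hc, h1, h2]]
            rw [tight, if_neg hc, if_neg h1, if_pos h2]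
            simp [fPop]
          · rw [show fScan (c :: cs) (d :: ds) 0 [] = fScan cs ds 1 [] by
                simp [fScan, hc, h1, h2]]
            rw [fScan_shift cs ds 1 []]
            rcases hp : fScan cs ds 0 [] with ⟨find, stk⟩
            rw [hp] at IH
            cases find
            · simp only []
              have e1 : (([] : List Nat) ++ stk.map (fun x : Nat => x + 1)).reverse =
                  stk.reverse.map (fun x : Nat => x + 1) := by simp
              rw [e1, fPop_shift_fix c d hc cs ds stk.reverse]
              rw [tight, if_neg hc, if_neg h1, if_neg h2, ← IH]
              simp only []
              cases fPop cs ds stk.reverse <;> simp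
            · simp only [List.nil_append]
              rw [fSetAll_shift ds d c stk cs, tight, if_neg hc, if_neg h1, if_neg h2, ← IH]
              simp [fill0_ne_q c hc]

-- ===== VERDICT (by name: the statement is the Claim_ definition above) =====
theorem f_spec : Claim_equal_f := by
  intro s last _ _
  unfold Spec_f f f_alt
  by_cases hq : '?' ∈ s.toList
  · have hnn : ¬ ('?' ∉ s.toList) := not_not_intro hq
    simp only [hnn, if_false]
    by_cases hlt : s.toList.length < (PySem.Int.toStr last).toList.length
    · rw [if_pos hlt, if_pos hlt]
    · rw [if_neg hlt, if_neg hlt]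
      by_cases hgt : (PySem.Int.toStr last).toList.length < s.toList.length
      · rw [if_pos hgt, if_pos hgt]
        cases hsl : s.toList with
        | nil => rw [hsl] at hq; simp at hq
        | cons a as =>
          by_cases ha : a = '?'
          · simp [ha, fill0]
          · simp [ha, fill0_ne_q a ha]
      · rw [if_neg hgt, if_neg hgt]
        have hlen : s.toList.length = (PySem.Int.toStr last).toList.length := by omega
        have h := main_eq s.toList (PySem.Int.toStr last).toList hlen
          (by rw [PySem.Int.toList_toStr]; exact toChars_ne_q last)
        rcases hscan : fScan s.toList (PySem.Int.toStr last).toList 0 [] with ⟨find, stk⟩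
        rw [hscan] at h
        cases find
        · rw [← h]
        · rw [← h]
  · simp [hq]
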